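-- pv_equiv track=rewrite | github.com/fmaja/Metri | src/metri/logic/music_theory.py | get_all_midi_notes
-- ===== SOURCE A (Python) =====
-- def get_all_midi_notes(min_octave=2, max_octave=6):
--     """Returns a list of all MIDI notes in the specified octave range."""
--     notes = []
--     for octave in range(min_octave, max_octave + 1):
--         for i in range(12):
--             midi_val = i + (octave + 1) * 12
--             if 0 <= midi_val <= 127:
--                 notes.append(midi_val)
--     return notes
-- ===== SOURCE B (Python) =====
-- def get_all_midi_notes(min_octave=2, max_octave=6):
--     """Returns a list of all MIDI notes in the specified octave range."""
--     lo = max(0, (min_octave + 1) * 12)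
--     hi = min(127, (max_octave + 1) * 12 + 11)
--     return list(range(lo, hi + 1))
-- ===== Notes on version B (the rewrite author's own statement) =====
-- stated objective: simpler
-- what changed: Replaced the octave/semitone double loop with per-element range filtering by closed-form clamped interval endpoints (lo = max(0,(min_octave+1)*12), hi = min(127,(max_octave+1)*12+11)) and a single list(range(lo, hi+1)).
import Mathlib
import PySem

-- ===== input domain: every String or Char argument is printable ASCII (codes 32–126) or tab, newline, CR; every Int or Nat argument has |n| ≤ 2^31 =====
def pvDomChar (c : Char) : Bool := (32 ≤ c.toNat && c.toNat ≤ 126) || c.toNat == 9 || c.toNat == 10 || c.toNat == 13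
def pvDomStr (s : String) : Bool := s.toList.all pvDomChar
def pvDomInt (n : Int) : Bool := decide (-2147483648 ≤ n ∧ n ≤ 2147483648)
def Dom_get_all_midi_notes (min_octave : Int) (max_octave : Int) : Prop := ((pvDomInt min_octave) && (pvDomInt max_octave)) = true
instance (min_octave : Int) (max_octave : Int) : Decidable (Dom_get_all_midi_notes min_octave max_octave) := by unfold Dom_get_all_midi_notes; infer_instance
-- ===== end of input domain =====

-- B replaces the octave/semitone double loop with closed-form clamped interval endpoints and one range (simpler).

-- ===== PORT A =====
def get_all_midi_notes (min_octave : Int) (max_octave : Int) : List Int :=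
  (PySem.List.pyRange min_octave (max_octave + 1) 1).foldl (fun notes octave =>
    (PySem.List.pyRange 0 12 1).foldl (fun notes i =>
      let midi_val := i + (octave + 1) * 12
      if 0 ≤ midi_val ∧ midi_val ≤ 127 then notes ++ [midi_val] else notes) notes) []

-- ===== PORT B =====
def get_all_midi_notes_alt (min_octave : Int) (max_octave : Int) : List Int :=
  let lo := max 0 ((min_octave + 1) * 12)
  let hi := min 127 ((max_octave + 1) * 12 + 11)
  PySem.List.pyRange lo (hi + 1) 1

-- ===== PRECONDITION & SPEC =====
def Spec_get_all_midi_notes (min_octave : Int) (max_octave : Int) (out : List Int) : Prop := out = get_all_midi_notes_alt min_octave max_octave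
instance (min_octave : Int) (max_octave : Int) (out : List Int) : Decidable (Spec_get_all_midi_notes min_octave max_octave out) := by unfold Spec_get_all_midi_notes; infer_instance

-- ===== CLAIM (what is proved, stated in full; the proofs are below) =====
def Claim_equal_get_all_midi_notes : Prop := ∀ (min_octave : Int) (max_octave : Int), Dom_get_all_midi_notes min_octave max_octave → Spec_get_all_midi_notes min_octave max_octave (get_all_midi_notes min_octave max_octave)

-- ===== LEMMAS AND PROOFS =====

-- shifting a contiguous range
theorem pyRange_map_add (a b c : Int) :
    (PySem.List.pyRange a b 1).map (fun x => x + c) = PySem.List.pyRange (a + c) (b + c) 1 := by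
  rw [PySem.List.pyRange_one, PySem.List.pyRange_one, List.map_map]
  have h : b + c - (a + c) = b - a := by ring
  rw [h]
  exact List.map_congr_left (fun k _ => by simp [Function.comp]; ring)

-- filtering a contiguous range by an interval membership test
theorem pyRange_filter_interval (lo hi : Int) : ∀ (a b : Int),
    (PySem.List.pyRange a b 1).filter (fun x => decide (lo ≤ x ∧ x ≤ hi)) =
      PySem.List.pyRange (max a lo) (min b (hi + 1)) 1 := by
  intro a b
  by_cases hab : b ≤ a
  · rw [PySem.List.pyRange_one_eq_nil hab, PySem.List.pyRange_one_eq_nil (by omega)]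
    rfl
  · have hab' : a < b := by omega
    have hlt : ((b - (a+1)).toNat) < ((b - a).toNat) := by omega
    have ih := pyRange_filter_interval lo hi (a + 1) b
    rw [PySem.List.pyRange_one_cons hab', List.filter_cons, ih]
    by_cases hin : lo ≤ a ∧ a ≤ hi
    · have h1 : max a lo = a := by omega
      have h2 : max (a + 1) lo = a + 1 := by omega
      have h3 : a < min b (hi + 1) := by omega
      simp only [hin, decide_true, and_self, if_true, h1, h2]
      rw [PySem.List.pyRange_one_cons h3]
    · have hdec : decide (lo ≤ a ∧ a ≤ hi) = false := by
        simp only [decide_eq_false_iff_not]; exact hin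
      simp only [hdec]
      by_cases hlo : a < lo
      · have hmx : max a lo = max (a + 1) lo := by omega
        rw [hmx]; simp
      · have hhi : hi < a := by omega
        rw [PySem.List.pyRange_one_eq_nil (a := max a lo) (b := min b (hi + 1)) (by omega),
          PySem.List.pyRange_one_eq_nil (a := max (a + 1) lo) (b := min b (hi + 1)) (by omega)]
        simp
termination_by a b => (b - a).toNat

-- the inner semitone loop of A, from accumulator acc, appends one clamped block
theorem inner_block (acc : List Int) (o : Int) :
    (PySem.List.pyRange 0 12 1).foldl (fun notes i =>
        let midi_val := i + (o + 1) * 12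
        if 0 ≤ midi_val ∧ midi_val ≤ 127 then notes ++ [midi_val] else notes) acc =
      acc ++ PySem.List.pyRange (max 0 ((o + 1) * 12)) (min 128 ((o + 1) * 12 + 12)) 1 := by
  have h := PySem.List.foldl_append_ite (l := PySem.List.pyRange 0 12 1)
      (p := fun x => 0 ≤ x + (o + 1) * 12 ∧ x + (o + 1) * 12 ≤ 127)
      (f := fun x => x + (o + 1) * 12) (acc := acc)
  simp only at h
  rw [h]
  congr 1
  have hp : (PySem.List.pyRange 0 12 1).filter
        (fun x => decide (0 ≤ x + (o + 1) * 12 ∧ x + (o + 1) * 12 ≤ 127)) =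
      (PySem.List.pyRange 0 12 1).filter
        (fun x => decide (-((o + 1) * 12) ≤ x ∧ x ≤ 127 - (o + 1) * 12)) := by
    apply List.filter_congr
    intro x _
    simp only [decide_eq_decide]
    omega
  rw [hp, pyRange_filter_interval, pyRange_map_add]
  have e1 : max 0 (-((o + 1) * 12)) + (o + 1) * 12 = max 0 ((o + 1) * 12) := by omega
  have e2 : min 12 (127 - (o + 1) * 12 + 1) + (o + 1) * 12 = min 128 ((o + 1) * 12 + 12) := by omega
  rw [e1, e2]

-- the outer octave loop concatenates consecutive clamped blocks into one clamped range
theorem outer_blocks (mn : Int) : ∀ (mx : Int),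
    (PySem.List.pyRange mn (mx + 1) 1).foldl (fun notes octave =>
        (PySem.List.pyRange 0 12 1).foldl (fun notes i =>
          let midi_val := i + (octave + 1) * 12
          if 0 ≤ midi_val ∧ midi_val ≤ 127 then notes ++ [midi_val] else notes) notes) [] =
      PySem.List.pyRange (max 0 ((mn + 1) * 12)) (min 128 ((mx + 1) * 12 + 12)) 1 := by
  intro mx
  by_cases hab : mx + 1 ≤ mn
  · rw [PySem.List.pyRange_one_eq_nil hab,
      PySem.List.pyRange_one_eq_nil (a := max 0 ((mn + 1) * 12)) (b := min 128 ((mx + 1) * 12 + 12)) (by omega)]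
    rfl
  · have hlt : ((mx - 1 + 1 - mn).toNat) < ((mx + 1 - mn).toNat) := by omega
    have ih := outer_blocks mn (mx - 1)
    have hmx : mx - 1 + 1 = mx := by ring
    rw [hmx] at ih
    have hsplit : PySem.List.pyRange mn (mx + 1) 1 = PySem.List.pyRange mn mx 1 ++ [mx] := by
      have := PySem.List.pyRange_one_succ_right (a := mn) (b := mx) (by omega)
      simpa using this
    rw [hsplit, List.foldl_append]
    simp only [List.foldl_cons, List.foldl_nil]
    rw [ih, inner_block]
    by_cases hneg : (mx + 1) * 12 < 0
    · -- entire block below 0: both the new block and the tail vanish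
      rw [PySem.List.pyRange_one_eq_nil (a := max 0 ((mn + 1) * 12)) (b := min 128 (mx * 12 + 12)) (by omega),
        PySem.List.pyRange_one_eq_nil (a := max 0 ((mx + 1) * 12)) (b := min 128 ((mx + 1) * 12 + 12)) (by omega),
        PySem.List.pyRange_one_eq_nil (a := max 0 ((mn + 1) * 12)) (b := min 128 ((mx + 1) * 12 + 12)) (by omega)]
      rfl
    · by_cases hbig : 128 < (mx + 1) * 12
      · -- entire block above 127: the new block is empty and the clamps agree
        rw [PySem.List.pyRange_one_eq_nil (a := max 0 ((mx + 1) * 12)) (b := min 128 ((mx + 1) * 12 + 12)) (by omega),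
          List.append_nil]
        have h0 : min 128 (mx * 12 + 12) = min 128 ((mx + 1) * 12 + 12) := by omega
        rw [h0]
      · -- middle case: split point M = (mx+1)*12 lies between the clamps
        have h1 : min 128 (mx * 12 + 12) = (mx + 1) * 12 := by omega
        have h2 : max 0 ((mx + 1) * 12) = (mx + 1) * 12 := by omega
        rw [h1, h2]
        exact (PySem.List.pyRange_one_append (max 0 ((mn + 1) * 12)) ((mx + 1) * 12)
          (min 128 ((mx + 1) * 12 + 12)) (by omega) (by omega)).symm
termination_by mx => (mx + 1 - mn).toNat

-- ===== VERDICT (by name: the statement is the Claim_ definition above) =====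
theorem get_all_midi_notes_spec : Claim_equal_get_all_midi_notes := by
  intro mn mx _
  unfold Spec_get_all_midi_notes get_all_midi_notes
  simp only [get_all_midi_notes_alt]
  rw [outer_blocks]
  have e : min 127 ((mx + 1) * 12 + 11) + 1 = min 128 ((mx + 1) * 12 + 12) := by omega
  rw [e]
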